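-- pv_equiv track=rewrite | github.com/Refusned/wb-price-tracker-bot | app/utils/business_formatting.py | build_stock_message
-- ===== SOURCE A (Python) =====
-- def build_stock_message(stocks: list[dict]) -> str:
--     if not stocks:
--         return "📦 Остатков нет. Жду следующий скан Seller API (обновляется каждые 30 мин)."
--
--     lines = ["📦 Остатки по складам WB", ""]
--     total_all = 0
--     total_in_way = 0
--     for s in stocks:
--         qty = int(s.get("total_qty", 0) or 0)
--         in_way_to = int(s.get("total_in_way_to", 0) or 0)
--         total_all += qty
--         total_in_way += in_way_to
--         art = s.get("supplier_article") or s.get("nm_id")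
--         subject = s.get("subject") or ""
--         wh = int(s.get("warehouse_count", 0) or 0)
--         lines.append(
--             f"Артикул {art} ({subject[:30]}):"
--         )
--         lines.append(f"  Всего на складах: {qty} шт ({wh} складов)")
--         if in_way_to > 0:
--             lines.append(f"  В пути к клиенту: {in_way_to} шт")
--         lines.append("")
--
--     lines.insert(2, f"Всего: {total_all} шт | В пути: {total_in_way} шт")
--     lines.insert(3, "")
--     return "\n".join(lines).rstrip()
-- ===== SOURCE B (Python) =====
-- def _num(s, key):
--     return int(s.get(key, 0) or 0)
--
--
-- def _block(s):
--     art = s.get("supplier_article") or s.get("nm_id")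
--     subject = s.get("subject") or ""
--     block = [
--         f"Артикул {art} ({subject[:30]}):",
--         f"  Всего на складах: {_num(s, 'total_qty')} шт ({_num(s, 'warehouse_count')} складов)",
--     ]
--     if _num(s, "total_in_way_to") > 0:
--         block.append(f"  В пути к клиенту: {_num(s, 'total_in_way_to')} шт")
--     block.append("")
--     return block
--
--
-- def build_stock_message(stocks: list[dict]) -> str:
--     if not stocks:
--         return "📦 Остатков нет. Жду следующий скан Seller API (обновляется каждые 30 мин)."
--     total_all = sum(_num(s, "total_qty") for s in stocks)
--     total_in_way = sum(_num(s, "total_in_way_to") for s in stocks)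
--     lines = [
--         "📦 Остатки по складам WB",
--         "",
--         f"Всего: {total_all} шт | В пути: {total_in_way} шт",
--         "",
--     ]
--     for s in stocks:
--         lines.extend(_block(s))
--     return "\n".join(lines).rstrip()
-- ===== Notes on version B (the rewrite author's own statement) =====
-- stated objective: simpler
-- what changed: Totals are computed by two dedicated sum() passes and the lines list is built directly in its final order (header, blank, totals, blank, then per-stock blocks from a helper), eliminating the mixed aggregation loop and the list.insert splicing; Pre_ excludes only inputs where A raises ValueError on a non-integer value under a numeric key.
import Mathlib
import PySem

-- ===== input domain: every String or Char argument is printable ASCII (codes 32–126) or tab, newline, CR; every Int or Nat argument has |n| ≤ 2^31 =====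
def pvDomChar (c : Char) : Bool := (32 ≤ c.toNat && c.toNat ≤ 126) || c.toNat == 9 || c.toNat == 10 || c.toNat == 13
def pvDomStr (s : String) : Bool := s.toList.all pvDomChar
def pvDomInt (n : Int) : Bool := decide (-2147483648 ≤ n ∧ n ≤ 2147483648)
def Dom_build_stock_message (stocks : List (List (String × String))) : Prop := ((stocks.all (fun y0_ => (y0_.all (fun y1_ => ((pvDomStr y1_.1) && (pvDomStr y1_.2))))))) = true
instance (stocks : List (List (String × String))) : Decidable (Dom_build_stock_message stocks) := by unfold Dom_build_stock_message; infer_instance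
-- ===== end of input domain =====

-- B computes the totals in dedicated sum passes and emits the lines in final order
-- (header block first, then per-stock blocks from a helper), removing the insert splicing; objective: simpler.


-- ===== PORT A =====
-- int(s.get(key, 0) or 0): missing or "" is 0; otherwise int(v) — Pre_ excludes the ValueError case (ofStr? = none)
def pvNum (s : List (String × String)) (key : String) : Int :=
  match PySem.Dict.get? (PySem.Dict.ofList s) key with
  | none => 0
  | some v => if v = "" then 0 else (PySem.Int.ofStr? v).getD 0

-- s.get("supplier_article") or s.get("nm_id"), rendered by the f-string (None prints as "None")
def pvArt (s : List (String × String)) : String :=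
  let fb := match PySem.Dict.get? (PySem.Dict.ofList s) "nm_id" with
            | none => "None"
            | some v => v
  match PySem.Dict.get? (PySem.Dict.ofList s) "supplier_article" with
  | none => fb
  | some v => if v = "" then fb else v

-- s.get("subject") or ""
def pvSubject (s : List (String × String)) : String :=
  match PySem.Dict.get? (PySem.Dict.ofList s) "subject" with
  | none => ""
  | some v => v

-- the body of A's for-loop: state (lines, total_all, total_in_way)
def pvStepA (acc : List String × Int × Int) (s : List (String × String)) : List String × Int × Int :=
  let qty := pvNum s "total_qty"
  let in_way_to := pvNum s "total_in_way_to"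
  let total_all := acc.2.1 + qty
  let total_in_way := acc.2.2 + in_way_to
  let art := pvArt s
  let subject := pvSubject s
  let wh := pvNum s "warehouse_count"
  let lines := acc.1 ++ ["Артикул " ++ art ++ " (" ++ PySem.Str.slice subject none (some 30) ++ "):"]
  let lines := lines ++ ["  Всего на складах: " ++ PySem.Int.toStr qty ++ " шт (" ++ PySem.Int.toStr wh ++ " складов)"]
  let lines := if in_way_to > 0 then lines ++ ["  В пути к клиенту: " ++ PySem.Int.toStr in_way_to ++ " шт"] else lines
  (lines ++ [""], total_all, total_in_way)

def build_stock_message (stocks : List (List (String × String))) : String :=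
  if stocks = [] then
    "📦 Остатков нет. Жду следующий скан Seller API (обновляется каждые 30 мин)."
  else
    let st := stocks.foldl pvStepA (["📦 Остатки по складам WB", ""], 0, 0)
    let lines := PySem.List.insert st.1 2 ("Всего: " ++ PySem.Int.toStr st.2.1 ++ " шт | В пути: " ++ PySem.Int.toStr st.2.2 ++ " шт")
    let lines := PySem.List.insert lines 3 ""
    PySem.Str.rstrip (PySem.Str.join "\n" lines)

-- ===== PORT B =====
-- _block(s) from Source B
def pvBlockB (s : List (String × String)) : List String :=
  let block := ["Артикул " ++ pvArt s ++ " (" ++ PySem.Str.slice (pvSubject s) none (some 30) ++ "):",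
                "  Всего на складах: " ++ PySem.Int.toStr (pvNum s "total_qty") ++ " шт (" ++ PySem.Int.toStr (pvNum s "warehouse_count") ++ " складов)"]
  let block := if pvNum s "total_in_way_to" > 0
               then block ++ ["  В пути к клиенту: " ++ PySem.Int.toStr (pvNum s "total_in_way_to") ++ " шт"]
               else block
  block ++ [""]

def build_stock_message_alt (stocks : List (List (String × String))) : String :=
  if stocks = [] then
    "📦 Остатков нет. Жду следующий скан Seller API (обновляется каждые 30 мин)."
  else
    let total_all := (stocks.map (fun s => pvNum s "total_qty")).sum
    let total_in_way := (stocks.map (fun s => pvNum s "total_in_way_to")).sum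
    let lines := ["📦 Остатки по складам WB", "",
                  "Всего: " ++ PySem.Int.toStr total_all ++ " шт | В пути: " ++ PySem.Int.toStr total_in_way ++ " шт", ""]
      ++ stocks.flatMap pvBlockB
    PySem.Str.rstrip (PySem.Str.join "\n" lines)

-- ===== PRECONDITION & SPEC =====
-- Pre_ excludes exactly the inputs where Python's int() raises ValueError: a present, non-empty
-- value under one of the three numeric keys that does not parse as an integer.
def pvOkNum (s : List (String × String)) (key : String) : Bool :=
  let v := (PySem.Dict.get? (PySem.Dict.ofList s) key).getD ""
  v == "" || (PySem.Int.ofStr? v).isSome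

def Pre_build_stock_message (stocks : List (List (String × String))) : Prop :=
  ∀ s ∈ stocks, pvOkNum s "total_qty" = true ∧ pvOkNum s "total_in_way_to" = true ∧ pvOkNum s "warehouse_count" = true
instance (stocks : List (List (String × String))) : Decidable (Pre_build_stock_message stocks) := by unfold Pre_build_stock_message; infer_instance

def pvWitness_build_stock_message : (List (List (String × String))) :=
  [[("total_qty", "5"), ("supplier_article", "A1"), ("total_in_way_to", "2")]]

def Spec_build_stock_message (stocks : List (List (String × String))) (out : String) : Prop := out = build_stock_message_alt stocks
instance (stocks : List (List (String × String))) (out : String) : Decidable (Spec_build_stock_message stocks out) := by unfold Spec_build_stock_message; infer_instance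

-- ===== CLAIM (what is proved, stated in full; the proofs are below) =====
def Claim_equal_build_stock_message : Prop := ∀ (stocks : List (List (String × String))), Dom_build_stock_message stocks → Pre_build_stock_message stocks → Spec_build_stock_message stocks (build_stock_message stocks)

-- ===== LEMMAS AND PROOFS =====

-- one step of A's loop appends exactly B's block and adds the two per-stock numbers
lemma pvStepA_eq (acc : List String × Int × Int) (s : List (String × String)) :
    pvStepA acc s = (acc.1 ++ pvBlockB s, acc.2.1 + pvNum s "total_qty", acc.2.2 + pvNum s "total_in_way_to") := by
  unfold pvStepA pvBlockB
  by_cases h : pvNum s "total_in_way_to" > 0 <;> simp [h, List.append_assoc]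

-- A's whole loop, characterised: lines are the initial lines followed by B's blocks, totals are B's sums
lemma pvLoopA (stocks : List (List (String × String))) (L : List String) (a b : Int) :
    stocks.foldl pvStepA (L, a, b) =
      (L ++ stocks.flatMap pvBlockB,
       a + (stocks.map (fun s => pvNum s "total_qty")).sum,
       b + (stocks.map (fun s => pvNum s "total_in_way_to")).sum) := by
  induction stocks generalizing L a b with
  | nil => simp
  | cons s rest ih =>
    simp only [List.foldl_cons, pvStepA_eq, ih, List.flatMap_cons, List.map_cons, List.sum_cons]
    refine Prod.ext ?_ (Prod.ext ?_ ?_) <;> simp [List.append_assoc] <;> ring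

-- splicing the totals line and a blank at positions 2 and 3 of the header-plus-body list
lemma pvInsert23 {x y t : String} (body : List String) :
    PySem.List.insert (PySem.List.insert (x :: y :: body) 2 t) 3 "" = x :: y :: t :: "" :: body := by
  rw [PySem.List.insert_ofNat _ 2 _ (by simp)]
  rw [PySem.List.insert_ofNat _ 3 _ (by simp)]
  simp

theorem build_stock_message_spec : Claim_equal_build_stock_message := by
  unfold Claim_equal_build_stock_message
  intro stocks _ _
  unfold Spec_build_stock_message build_stock_message build_stock_message_alt
  by_cases h : stocks = []
  · simp [h]
  · simp only [h, if_false]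
    rw [pvLoopA]
    simp only [zero_add, List.cons_append, List.nil_append]
    rw [pvInsert23]
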